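/-
  `u_call hc at addr`: THE CONTRACT OF AN INDIRECT CALLEE, applied where the walk stopped.

  `u_walk` stops after an indirect `call rax` whose target is not a literal (`w_rip : s.rip = x`, `x` a variable: the
  comparison function of `qsort`). `hc : Calls L μ I K x s` is the contract of the function at `x`. `u_call hc at 0x10133d`
  (the address of the `call` instruction: it only names the goals and the returned state) does at this state exactly what
  `u_walk` does at a direct call to a function with a contract in the context (`UserX.Walk.walkCall`): the goals `call_align`,
  `call_room`, `call_top`, `call_code`, `call_inv` (what the side tactic does not close) and `pre_<addr>`, then the goal that
  continues at the returned state `s_<addr>r` with `w_rip` (the literal return address), `w_rsp`, `w_kept`, the callee-saved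
  registers' facts, `w_same`, `w_code`, `w_inv`, `w_post`; the facts of the state at the callee's entry stay: `w_mem_<addr>`,
  its registers `w_<r>_<addr>`, `w_kept_<addr>` (the callee's footprint and postcondition are about them). Options: `side (tac)`
  as for `u_walk`.
  ALSO FOR A DIRECT CALL: `u_walk … until [Vorbis.L.swap_bytes.entry]` stops at the callee's entry (a cut point), and
  `u_call (h_swap_bytes others frames) at 0x10134c` applies the contract there.
-/
import UserX.Call

namespace UserX.Walk
open Lean Meta Elab Tactic
open X86 X86.User

syntax "u_call " term:max " at " term:max (" side " "(" tacticSeq ")")? : tactic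

elab_rules : tactic
  | `(tactic| u_call $hc at $a $[side ($sideTac?)]?) => withMainContext do
    let g ← getMainGoal
    let rest := (← getGoals).drop 1
    let hcE ← instantiateMVars (← Lean.Elab.Term.elabTerm hc none |>.run')
    let ty := (← whnfR (← instantiateMVars (← inferType hcE))).cleanupAnnotations
    unless ty.isAppOfArity ``Calls 6 do
      throwError "u_call: not a contract `Calls L μ I K entry s`:{indentExpr ty}"
    let t := (← instantiateMVars (← g.getType)).cleanupAnnotations
    unless t.isAppOfArity ``ReachVia 5 do
      throwError "u_call: the goal is not `ReachVia L μ I v P`"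
    let cur := (t.getArg! 3).consumeMData
    unless cur.isFVar do
      throwError "u_call: the state of the goal is not a variable:{indentExpr cur}"
    let ws ← scanState cur
    let some (_, ripVal) := ws.rip?
      | throwError "u_call: the context does not say what RIP is"
    unless ← isDefEq ripVal (ty.getArg! 4) do
      throwError "u_call: RIP is{indentExpr ripVal}\nbut the contract is about the entry{indentExpr (ty.getArg! 4)}"
    let addr ← evalAddr a.raw
    let L := ty.getArg! 0
    let sideTac : Syntax ← match sideTac? with
      | some tac => pure tac.raw
      | none => pure (← `(tactic| u_omega)).raw
    let (condC, valC) ← mkSimpSets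
    let cfg : Cfg :=
      { code := L, codeState := L, layout := L, codeName := `none, base := 0, len := 0, lo := 0, hi := 0, hlo := L, hhi := L
        extra := #[], cuts := [], sideTac := sideTac, prune := false
        condCtx := condC.ctx, condProcs := condC.simprocs, valCtx := valC.ctx, valProcs := valC.simprocs }
    let (sides, mains) ← walkCall cfg g ws hcE ty.getAppArgs addr
    setGoals (sides ++ mains ++ rest)

end UserX.Walk
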